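-- pv_equiv track=rewrite | github.com/karasu/inabox | challenges/utils.py | is_same_primary_domain
-- ===== SOURCE A (Python) =====
-- def is_same_primary_domain(domain1, domain2):
--     i = -1
--     dots = 0
--     ldomain1 = len(domain1)
--     ldomain2 = len(domain2)
--     lmin = min(ldomain1, ldomain2)
--
--     while i >= -lmin:
--         char1 = domain1[i]
--         char2 = domain2[i]
--
--         if char1 == char2:
--             if char1 == '.':
--                 dots += 1
--                 if dots == 2:
--                     return True
--         else:
--             return False
--
--         i -= 1
--
--     if ldomain1 == ldomain2:
--         return True
--
--     if dots == 0:
--         return False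
--
--     character = domain1[i] if ldomain1 > lmin else domain2[i]
--     return character == '.'
-- ===== SOURCE B (Python) =====
-- def is_same_primary_domain(domain1, domain2):
--     return domain1.split('.')[-2:] == domain2.split('.')[-2:]
-- ===== Notes on version B (the rewrite author's own statement) =====
-- stated objective: simpler
-- what changed: Replaces the reverse character-by-character scan with a dot counter and length/boundary post-checks by tokenizing each domain on '.' and comparing the last two labels.
import Mathlib
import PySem

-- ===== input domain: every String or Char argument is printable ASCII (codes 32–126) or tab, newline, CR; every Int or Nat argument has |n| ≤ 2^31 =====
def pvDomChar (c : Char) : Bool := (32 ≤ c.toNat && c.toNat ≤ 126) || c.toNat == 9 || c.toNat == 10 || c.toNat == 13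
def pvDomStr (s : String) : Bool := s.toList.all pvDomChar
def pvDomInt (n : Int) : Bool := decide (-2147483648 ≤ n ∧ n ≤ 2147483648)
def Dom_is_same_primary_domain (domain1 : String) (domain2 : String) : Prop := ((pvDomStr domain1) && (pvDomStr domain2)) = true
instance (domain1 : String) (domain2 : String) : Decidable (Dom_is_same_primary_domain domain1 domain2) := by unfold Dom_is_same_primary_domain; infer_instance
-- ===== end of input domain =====

-- B replaces A's reverse character scan (dot counter + length/boundary post-checks)
-- by splitting each domain on '.' and comparing the last two labels; objective: simpler.


-- ===== PORT A =====
-- A's while loop over negative index i (i = -1, -2, …, -lmin) walks both strings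
-- from the end; ported as pairwise recursion over the REVERSED character lists
-- (same characters, same order), carrying the dot counter and the full lengths.
def isSameGo (r1 r2 : List Char) (dots : Nat) (l1 l2 : Int) : Bool :=
  match r1, r2 with
  | c1 :: t1, c2 :: t2 =>
    if c1 == c2 then
      if c1 == '.' then
        if dots + 1 == 2 then true else isSameGo t1 t2 (dots + 1) l1 l2
      else isSameGo t1 t2 dots l1 l2
    else false
  | t1, t2 =>
    -- loop exhausted (i < -lmin): the Python post-checks
    if l1 == l2 then true
    else if dots == 0 then false
    else
      -- character = domain1[i] if ldomain1 > lmin else domain2[i]; i = -(lmin+1),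
      -- i.e. the head of the longer side's remaining reversed list (always in range here)
      (if decide (min l1 l2 < l1) then t1.headD ' ' else t2.headD ' ') == '.'

def is_same_primary_domain (domain1 : String) (domain2 : String) : Bool :=
  isSameGo domain1.toList.reverse domain2.toList.reverse 0
    (PySem.Str.len domain1) (PySem.Str.len domain2)

-- ===== PORT B =====
-- Source B: return domain1.split('.')[-2:] == domain2.split('.')[-2:]
def is_same_primary_domain_alt (domain1 : String) (domain2 : String) : Bool :=
  PySem.List.slice (PySem.Chars.splitOn domain1.toList ['.']) (some (-2)) none
    == PySem.List.slice (PySem.Chars.splitOn domain2.toList ['.']) (some (-2)) none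

-- ===== PRECONDITION & SPEC =====
def Spec_is_same_primary_domain (domain1 : String) (domain2 : String) (out : Bool) : Prop := out = is_same_primary_domain_alt domain1 domain2
instance (domain1 : String) (domain2 : String) (out : Bool) : Decidable (Spec_is_same_primary_domain domain1 domain2 out) := by unfold Spec_is_same_primary_domain; infer_instance

-- ===== CLAIM (what is proved, stated in full; the proofs are below) =====
def Claim_equal_is_same_primary_domain : Prop := ∀ (domain1 : String) (domain2 : String), Dom_is_same_primary_domain domain1 domain2 → Spec_is_same_primary_domain domain1 domain2 (is_same_primary_domain domain1 domain2)

-- ===== LEMMAS AND PROOFS =====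

-- split of a char list on '.', as a structural pair (first label, remaining labels)
def spl : List Char → List Char × List (List Char)
  | [] => ([], [])
  | c :: t => if c = '.' then ([], (spl t).1 :: (spl t).2) else (c :: (spl t).1, (spl t).2)

def lab (cs : List Char) : List (List Char) := (spl cs).1 :: (spl cs).2

-- prefix of a reversed list up to the first / second '.' (exclusive)
def hd1 : List Char → List Char
  | [] => []
  | c :: t => if c = '.' then [] else c :: hd1 t

def hd2 : List Char → List Char
  | [] => []
  | c :: t => if c = '.' then '.' :: hd1 t else c :: hd2 t

theorem splitOn_go_spec (fuel : Nat) (l cur : List Char) (acc : List (List Char))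
    (h : l.length < fuel) :
    PySem.Chars.splitOn.go ['.'] fuel l cur acc
      = acc.reverse ++ (cur.reverse ++ (spl l).1) :: (spl l).2 := by
  induction fuel generalizing l cur acc with
  | zero => omega
  | succ fuel ih =>
    cases l with
    | nil => simp [PySem.Chars.splitOn.go, spl]
    | cons c rest =>
      by_cases hc : c = '.'
      · subst hc
        rw [show PySem.Chars.splitOn.go ['.'] (fuel+1) ('.'::rest) cur acc
              = PySem.Chars.splitOn.go ['.'] fuel (List.drop 1 ('.'::rest)) [] (cur.reverse :: acc) by
            simp [PySem.Chars.splitOn.go, List.isPrefixOf]]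
        rw [ih _ _ _ (by simpa using Nat.lt_of_succ_lt_succ h)]
        simp [spl]
      · rw [show PySem.Chars.splitOn.go ['.'] (fuel+1) (c::rest) cur acc
              = PySem.Chars.splitOn.go ['.'] fuel rest (c :: cur) acc by
            simp [PySem.Chars.splitOn.go, List.isPrefixOf, show ('.' == c) = false by simp [Ne.symm hc]]]
        rw [ih _ _ _ (by simpa using Nat.lt_of_succ_lt_succ h)]
        simp [spl, hc]

theorem splitOn_eq_lab (cs : List Char) : PySem.Chars.splitOn cs ['.'] = lab cs := by
  rw [PySem.Chars.splitOn, splitOn_go_spec _ _ _ _ (by omega)]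
  simp [lab]

theorem hd1_eq_spl1 (r : List Char) : hd1 r = (spl r).1 := by
  induction r with
  | nil => rfl
  | cons c t ih => by_cases hc : c = '.' <;> simp [hd1, spl, hc, ih]

theorem hd2_eq_enc (r : List Char) :
    hd2 r = (spl r).1 ++ (match (spl r).2 with | [] => [] | x :: _ => '.' :: x) := by
  induction r with
  | nil => rfl
  | cons c t ih =>
    by_cases hc : c = '.'
    · simp [hd2, spl, hc, hd1_eq_spl1]
    · simp [hd2, spl, hc, ih]

theorem spl_dotfree1 (r : List Char) : '.' ∉ (spl r).1 := by
  induction r with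
  | nil => simp [spl]
  | cons c t ih =>
    by_cases hc : c = '.' <;> simp [spl, hc, ih]
    exact fun h => hc h.symm

theorem spl_dotfree2 (r : List Char) : ∀ x ∈ (spl r).2, '.' ∉ x := by
  induction r with
  | nil => simp [spl]
  | cons c t ih =>
    by_cases hc : c = '.'
    · simp only [spl, if_pos hc]
      intro x hx
      rcases List.mem_cons.mp hx with h | h
      · subst h; exact spl_dotfree1 t
      · exact ih x h
    · simpa [spl, hc] using ih

-- uniqueness of splitting at a separator absent from the left parts
theorem append_dot_inj (l1 l2 r1 r2 : List Char) (h1 : '.' ∉ l1) (h2 : '.' ∉ l2)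
    (h : l1 ++ '.' :: r1 = l2 ++ '.' :: r2) : l1 = l2 ∧ r1 = r2 := by
  induction l1 generalizing l2 with
  | nil =>
    cases l2 with
    | nil => simpa using h
    | cons y m =>
      simp only [List.nil_append, List.cons_append, List.cons.injEq] at h
      exact absurd (List.mem_cons_self) (h.1 ▸ h2)
  | cons x m1 ih =>
    cases l2 with
    | nil =>
      simp only [List.nil_append, List.cons_append, List.cons.injEq] at h
      exact absurd (List.mem_cons_self) (h.1.symm ▸ h1)
    | cons y m2 =>
      simp only [List.cons_append, List.cons.injEq] at h
      have := ih (fun hm => h1 (List.mem_cons_of_mem _ hm)) (l2 := m2)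
        (fun hm => h2 (List.mem_cons_of_mem _ hm)) h.2
      exact ⟨by rw [h.1, this.1], this.2⟩

theorem lab_ne_nil (cs : List Char) : lab cs ≠ [] := by
  simp [lab]

theorem lab_dotfree (cs : List Char) : ∀ x ∈ lab cs, '.' ∉ x := by
  intro x hx
  rcases List.mem_cons.mp hx with h | h
  · subst h; exact spl_dotfree1 cs
  · exact spl_dotfree2 cs x h

-- joining the labels with '.' recovers the string
theorem lab_join (cs : List Char) : ['.'].intercalate (lab cs) = cs := by
  induction cs with
  | nil => simp [lab, spl, List.intercalate]
  | cons c t ih =>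
    by_cases hc : c = '.'
    · subst hc
      show ['.'].intercalate ([] :: (spl t).1 :: (spl t).2) = '.' :: t
      rw [show ['.'].intercalate ([] :: (spl t).1 :: (spl t).2)
            = [] ++ ['.'] ++ ['.'].intercalate ((spl t).1 :: (spl t).2) from
          PySem.Chars.join_cons_cons ['.'] [] (spl t).1 (spl t).2]
      simpa using ih
    · rw [show lab (c :: t) = (c :: (spl t).1) :: (spl t).2 by simp [lab, spl, hc]]
      cases hr : (spl t).2 with
      | nil =>
        rw [show ['.'].intercalate [c :: (spl t).1] = c :: (spl t).1 from
          PySem.Chars.join_singleton ['.'] _]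
        have : ['.'].intercalate ((spl t).1 :: (spl t).2) = t := ih
        rw [hr] at this
        rw [show ['.'].intercalate [(spl t).1] = (spl t).1 from
          PySem.Chars.join_singleton ['.'] _] at this
        rw [this]
      | cons q r =>
        rw [show ['.'].intercalate ((c :: (spl t).1) :: q :: r)
              = (c :: (spl t).1) ++ ['.'] ++ ['.'].intercalate (q :: r) from
          PySem.Chars.join_cons_cons ['.'] _ q r]
        have : ['.'].intercalate ((spl t).1 :: (spl t).2) = t := ih
        rw [hr, show ['.'].intercalate ((spl t).1 :: q :: r)
              = (spl t).1 ++ ['.'] ++ ['.'].intercalate (q :: r) from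
          PySem.Chars.join_cons_cons ['.'] _ q r] at this
        simp only [List.cons_append] at this ⊢
        rw [this]

theorem lab_eq_splitOn (cs : List Char) : lab cs = List.splitOn '.' cs := by
  have h := List.splitOn_intercalate (lab cs) '.' (lab_dotfree cs) (lab_ne_nil cs)
  rw [lab_join] at h
  exact h.symm

theorem intercalate_snoc (x : Char) (Q : List (List Char)) (a : List Char) (hQ : Q ≠ []) :
    [x].intercalate (Q ++ [a]) = [x].intercalate Q ++ x :: a := by
  induction Q with
  | nil => simp at hQ
  | cons q Q' ih =>
    cases Q' with
    | nil =>
      rw [show ([q] : List (List Char)) ++ [a] = [q, a] from rfl,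
        show [x].intercalate [q, a] = q ++ [x] ++ [x].intercalate [a] from
          PySem.Chars.join_cons_cons [x] q a [],
        show [x].intercalate [a] = a from PySem.Chars.join_singleton [x] a,
        show [x].intercalate [q] = q from PySem.Chars.join_singleton [x] q]
      simp
    | cons p R =>
      have h1 : [x].intercalate (q :: ((p :: R) ++ [a]))
          = q ++ [x] ++ [x].intercalate ((p :: R) ++ [a]) :=
        PySem.Chars.join_cons_cons [x] q p (R ++ [a])
      rw [show (q :: p :: R) ++ [a] = q :: ((p :: R) ++ [a]) from rfl, h1,
        ih (by simp), show [x].intercalate (q :: p :: R) = q ++ [x] ++ [x].intercalate (p :: R) from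
          PySem.Chars.join_cons_cons [x] q p R]
      simp

theorem intercalate_reverse (x : Char) (P : List (List Char)) :
    [x].intercalate ((P.map List.reverse).reverse) = ([x].intercalate P).reverse := by
  induction P with
  | nil => simp [List.intercalate]
  | cons a Q ih =>
    cases Q with
    | nil =>
      simp only [List.map_cons, List.map_nil, List.reverse_cons, List.reverse_nil,
        List.nil_append]
      rw [show [x].intercalate [a.reverse] = a.reverse from PySem.Chars.join_singleton [x] _,
        show [x].intercalate [a] = a from PySem.Chars.join_singleton [x] _]
    | cons b R =>
      have hmap : ((a :: b :: R).map List.reverse).reverse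
          = ((b :: R).map List.reverse).reverse ++ [a.reverse] := by simp
      rw [hmap, intercalate_snoc x _ _ (by simp), ih,
        show [x].intercalate (a :: b :: R) = a ++ [x] ++ [x].intercalate (b :: R) from
          PySem.Chars.join_cons_cons [x] a b R]
      simp

theorem lab_reverse (cs : List Char) : lab cs.reverse = ((lab cs).map List.reverse).reverse := by
  have hrev : cs.reverse = ['.'].intercalate (((lab cs).map List.reverse).reverse) := by
    rw [intercalate_reverse, lab_join]
  rw [lab_eq_splitOn, hrev,
    List.splitOn_intercalate _ '.'
      (by
        intro l hl
        rcases List.mem_reverse.mp hl with hl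
        rcases List.mem_map.mp hl with ⟨y, hy, rfl⟩
        simpa using lab_dotfree cs y hy)
      (by simp [lab])]

-- the A-side loop characterised by hd1 / hd2 on the reversed lists
theorem isSameGo_one (r1 r2 : List Char) (l1 l2 : Int) (h1 : (r1.length : Int) ≤ l1)
    (h2 : (r2.length : Int) ≤ l2) (hd : l1 - r1.length = l2 - r2.length) :
    isSameGo r1 r2 1 l1 l2 = (hd1 r1 == hd1 r2) := by
  induction r1 generalizing r2 l1 l2 with
  | nil =>
    cases r2 with
    | nil =>
      have : l1 = l2 := by simp at hd; omega
      simp [isSameGo, hd1, this]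
    | cons c2 t2 =>
      have hne : l1 ≠ l2 := by simp at hd h2; omega
      have hmin : ¬ (min l1 l2 < l1) := by simp at hd h2; omega
      by_cases hc : c2 = '.' <;>
        simp [isSameGo, hne, hmin, hd1, hc]
  | cons c1 t1 ih =>
    cases r2 with
    | nil =>
      have hne : l1 ≠ l2 := by simp at hd h1; omega
      have hmin : min l1 l2 < l1 := by simp at hd h1; omega
      by_cases hc : c1 = '.' <;>
        simp [isSameGo, hne, hmin, hd1, hc]
    | cons c2 t2 =>
      by_cases hc : c1 = c2
      · subst hc
        by_cases hdot : c1 = '.'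
        · subst hdot
          simp [isSameGo, hd1]
        · have := ih (r2 := t2) (l1 := l1) (l2 := l2)
            (by simp at h1 ⊢; omega) (by simp at h2 ⊢; omega) (by simp at hd ⊢; omega)
          simp [isSameGo, hdot, this, hd1]
      · have : hd1 (c1 :: t1) ≠ hd1 (c2 :: t2) := by
          by_cases h1' : c1 = '.' <;> by_cases h2' : c2 = '.' <;>
            simp_all [hd1]
        simp [isSameGo, hc, this]

theorem isSameGo_zero (r1 r2 : List Char) (l1 l2 : Int) (h1 : (r1.length : Int) ≤ l1)
    (h2 : (r2.length : Int) ≤ l2) (hd : l1 - r1.length = l2 - r2.length) :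
    isSameGo r1 r2 0 l1 l2 = (hd2 r1 == hd2 r2) := by
  induction r1 generalizing r2 l1 l2 with
  | nil =>
    cases r2 with
    | nil =>
      have : l1 = l2 := by simp at hd; omega
      simp [isSameGo, hd2, this]
    | cons c2 t2 =>
      have hne : l1 ≠ l2 := by simp at hd h2; omega
      by_cases hc : c2 = '.' <;>
        simp [isSameGo, hne, hd2, hc]
  | cons c1 t1 ih =>
    cases r2 with
    | nil =>
      have hne : l1 ≠ l2 := by simp at hd h1; omega
      by_cases hc : c1 = '.' <;>
        simp [isSameGo, hne, hd2, hc]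
    | cons c2 t2 =>
      by_cases hc : c1 = c2
      · subst hc
        by_cases hdot : c1 = '.'
        · subst hdot
          have := isSameGo_one t1 t2 l1 l2
            (by simp at h1 ⊢; omega) (by simp at h2 ⊢; omega) (by simp at hd ⊢; omega)
          simp [isSameGo, this, hd2]
        · have := ih (r2 := t2) (l1 := l1) (l2 := l2)
            (by simp at h1 ⊢; omega) (by simp at h2 ⊢; omega) (by simp at hd ⊢; omega)
          simp [isSameGo, hdot, this, hd2]
      · have : hd2 (c1 :: t1) ≠ hd2 (c2 :: t2) := by
          by_cases h1' : c1 = '.' <;> by_cases h2' : c2 = '.' <;>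
            simp_all [hd2]
        simp [isSameGo, hc, this]

-- last two labels of cs ↔ hd2 of the reversed characters
theorem key_iff (cs1 cs2 : List Char) :
    ((lab cs1).drop ((lab cs1).length - 2) = (lab cs2).drop ((lab cs2).length - 2))
      ↔ hd2 cs1.reverse = hd2 cs2.reverse := by
  -- step 1: drop (n-2) of the labels ↔ take 2 of the labels of the reversed string
  have step1 : ∀ cs : List Char,
      (lab cs.reverse).take 2 = (((lab cs).drop ((lab cs).length - 2)).map List.reverse).reverse := by
    intro cs
    rw [lab_reverse, List.take_reverse, List.length_map, ← List.map_drop]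
  have inj : ∀ X Y : List (List Char),
      (X.map List.reverse).reverse = (Y.map List.reverse).reverse → X = Y := by
    intro X Y h
    have h2 := congrArg (fun Z : List (List Char) => (Z.reverse.map List.reverse)) h
    simpa [Function.comp] using h2
  constructor
  · intro h
    -- take 2 of both reversed-label lists agree
    have htake : (lab cs1.reverse).take 2 = (lab cs2.reverse).take 2 := by
      rw [step1, step1, h]
    rw [show lab cs1.reverse = (spl cs1.reverse).1 :: (spl cs1.reverse).2 from rfl,
      show lab cs2.reverse = (spl cs2.reverse).1 :: (spl cs2.reverse).2 from rfl] at htake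
    rw [List.take_succ_cons, List.take_succ_cons] at htake
    injection htake with ha htl
    rw [hd2_eq_enc, hd2_eq_enc, ha]
    cases e1 : (spl cs1.reverse).2 with
    | nil =>
      cases e2 : (spl cs2.reverse).2 with
      | nil => rfl
      | cons x r => rw [e1, e2] at htl; simp at htl
    | cons x r =>
      cases e2 : (spl cs2.reverse).2 with
      | nil => rw [e1, e2] at htl; simp at htl
      | cons y q =>
        rw [e1, e2] at htl
        simp only [List.take_succ_cons, List.take_zero] at htl
        injection htl with hxy
        rw [hxy]
  · intro h
    rw [hd2_eq_enc, hd2_eq_enc] at h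
    have hkey : (spl cs1.reverse).1 = (spl cs2.reverse).1 ∧
        (spl cs1.reverse).2.take 1 = (spl cs2.reverse).2.take 1 := by
      cases e1 : (spl cs1.reverse).2 with
      | nil =>
        cases e2 : (spl cs2.reverse).2 with
        | nil =>
          rw [e1, e2] at h
          exact ⟨by simpa using h, rfl⟩
        | cons y q =>
          rw [e1, e2] at h
          simp only [List.append_nil] at h
          exfalso
          exact spl_dotfree1 cs1.reverse (h ▸ List.mem_append_right _ (List.mem_cons_self))
      | cons x r =>
        cases e2 : (spl cs2.reverse).2 with
        | nil =>
          rw [e1, e2] at h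
          simp only [List.append_nil] at h
          exfalso
          exact spl_dotfree1 cs2.reverse (h ▸ List.mem_append_right _ (List.mem_cons_self))
        | cons y q =>
          rw [e1, e2] at h
          have := append_dot_inj _ _ _ _ (spl_dotfree1 cs1.reverse) (spl_dotfree1 cs2.reverse) h
          simp [this.1, this.2]
    have htake : (lab cs1.reverse).take 2 = (lab cs2.reverse).take 2 := by
      rw [show lab cs1.reverse = (spl cs1.reverse).1 :: (spl cs1.reverse).2 from rfl,
        show lab cs2.reverse = (spl cs2.reverse).1 :: (spl cs2.reverse).2 from rfl,
        List.take_succ_cons, List.take_succ_cons, hkey.1, hkey.2]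
    rw [step1, step1] at htake
    exact inj _ _ htake

-- ===== VERDICT (by name: the statement is the Claim_ definition above) =====
theorem is_same_primary_domain_spec : Claim_equal_is_same_primary_domain := by
  intro d1 d2 _
  unfold Spec_is_same_primary_domain is_same_primary_domain is_same_primary_domain_alt
  rw [isSameGo_zero _ _ _ _
      (by simp [PySem.Str.len])
      (by simp [PySem.Str.len])
      (by simp [PySem.Str.len])]
  rw [splitOn_eq_lab, splitOn_eq_lab,
    PySem.List.slice_from_neg_ofNat _ 2 (by norm_num),
    PySem.List.slice_from_neg_ofNat _ 2 (by norm_num)]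
  rw [Bool.eq_iff_iff]
  simp only [beq_iff_eq]
  exact (key_iff d1.toList d2.toList).symm
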